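-- pv_equiv track=rewrite | github.com/data-science-adventure/rater-agreement | modules/compute_cohens_kappa.py | get_consensus
-- ===== SOURCE A (Python) =====
-- from collections import Counter
--
-- def get_consensus(l1, l2, l3):
--     """
--     Aplica las reglas de negocio para el consenso: Mayoría, Tie-break y Lone Wolf.
--     Trata 'NONE' como una categoría válida.
--     """
--     labels = [l1, l2, l3]
--     counts = Counter(labels)
--
--     # Lobo Solitario (Lone Wolf): 2 NONE y 1 etiqueta válida
--     if counts.get('NONE', 0) == 2 and len(set(labels)) == 2:
--         valid_label = [l for l in labels if l != 'NONE'][0]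
--         return 'NONE', 'Lone Wolf'
--
--     # Unanimidad
--     if len(set(labels)) == 1:
--         return l1, 'Unanimous'
--
--     # Mayoría (2 de 3 coinciden)
--     most_common = counts.most_common(2)
--     if most_common[0][1] >= 2:
--         return most_common[0][0], 'Majority'
--
--     # Desempate de 3 vías (Tie-Break) -> Gana el Experto 1
--     return l1, 'Tie-Broken'
-- ===== SOURCE B (Python) =====
-- def get_consensus(l1, l2, l3):
--     """
--     Sort-then-scan: after sorting the three labels, equal labels are adjacent,
--     so the doubled label (if any) is always the middle element.
--     """
--     a, b, c = sorted([l1, l2, l3])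
--     if (a == 'NONE') + (b == 'NONE') + (c == 'NONE') == 2:
--         return 'NONE', 'Lone Wolf'
--     if a == c:
--         return l1, 'Unanimous'
--     if a == b or b == c:
--         return b, 'Majority'
--     return l1, 'Tie-Broken'
-- ===== Notes on version B (the rewrite author's own statement) =====
-- stated objective: alternative
-- what changed: Replaced the Counter/most_common frequency table and set-cardinality tests with sort-then-scan: sort the three labels so equal labels become adjacent and the doubled label (if any) is the middle element, then decide from adjacency of the sorted triple.
import Mathlib
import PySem

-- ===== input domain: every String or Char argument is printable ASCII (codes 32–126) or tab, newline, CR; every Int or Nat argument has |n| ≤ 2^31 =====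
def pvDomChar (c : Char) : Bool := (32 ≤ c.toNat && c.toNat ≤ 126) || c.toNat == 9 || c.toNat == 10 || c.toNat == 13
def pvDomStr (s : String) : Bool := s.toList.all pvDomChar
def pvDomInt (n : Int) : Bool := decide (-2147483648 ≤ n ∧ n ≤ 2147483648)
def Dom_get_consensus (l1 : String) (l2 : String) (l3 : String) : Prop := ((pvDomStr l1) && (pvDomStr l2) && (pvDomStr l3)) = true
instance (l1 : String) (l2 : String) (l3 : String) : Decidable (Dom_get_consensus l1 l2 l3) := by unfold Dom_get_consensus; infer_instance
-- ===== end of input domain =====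

-- B replaces A's Counter/most_common frequency table with sort-then-scan: after
-- sorting the three labels equal ones are adjacent and the doubled label, if any,
-- is the middle element (objective: simpler).

-- ===== PORT A =====
-- Counter(labels) = PySem.Dict.counter; most_common(2) ported as the stable
-- descending sort by count, take 2 (exactly Counter.most_common's order).
def get_consensus (l1 : String) (l2 : String) (l3 : String) : String × String :=
  let labels : List String := [l1, l2, l3]
  let counts := PySem.Dict.counter labels
  if counts.getD "NONE" 0 == 2 && PySem.Set.len (PySem.Set.ofList labels) == 2 then
    -- Python also binds valid_label (unused): first label ≠ 'NONE'
    ("NONE", "Lone Wolf")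
  else if PySem.Set.len (PySem.Set.ofList labels) == 1 then
    (l1, "Unanimous")
  else
    let most_common := (PySem.List.sorted counts.items (fun p => p.2) true).take 2
    if 2 ≤ most_common.headI.2 then (most_common.headI.1, "Majority")
    else (l1, "Tie-Broken")

-- ===== PORT B =====
-- a, b, c = sorted([l1, l2, l3]); the catch-all arm of the match is unreachable
-- (sorted of a 3-list has 3 elements) and mirrors Python's 3-way unpacking.
def get_consensus_alt (l1 : String) (l2 : String) (l3 : String) : String × String :=
  match PySem.List.sorted [l1, l2, l3] (fun s => s) false with
  | [a, b, c] =>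
    if ((if a == "NONE" then (1:Int) else 0) + (if b == "NONE" then 1 else 0)
        + (if c == "NONE" then 1 else 0)) == 2 then ("NONE", "Lone Wolf")
    else if a == c then (l1, "Unanimous")
    else if a == b || b == c then (b, "Majority")
    else (l1, "Tie-Broken")
  | _ => (l1, "Tie-Broken")

-- ===== PRECONDITION & SPEC =====
def Spec_get_consensus (l1 : String) (l2 : String) (l3 : String) (out : String × String) : Prop := out = get_consensus_alt l1 l2 l3
instance (l1 : String) (l2 : String) (l3 : String) (out : String × String) : Decidable (Spec_get_consensus l1 l2 l3 out) := by unfold Spec_get_consensus; infer_instance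

-- ===== CLAIM (what is proved, stated in full; the proofs are below) =====
def Claim_equal_get_consensus : Prop := ∀ (l1 : String) (l2 : String) (l3 : String), Dom_get_consensus l1 l2 l3 → Spec_get_consensus l1 l2 l3 (get_consensus l1 l2 l3)

-- ===== LEMMAS AND PROOFS =====

-- sorted of a triple equals any ≤-ordered rearrangement of it
lemma sort3 (x y z a b c : String) (hp : List.Perm [a,b,c] [x,y,z]) (h1 : a ≤ b) (h2 : b ≤ c) :
    PySem.List.sorted [x,y,z] (fun s => s) false = [a,b,c] :=
  PySem.List.sorted_id_eq_of_perm_of_pairwise [x,y,z] [a,b,c] hp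
    (by
      simp only [List.pairwise_cons, List.mem_cons, List.not_mem_nil]
      refine ⟨fun w hw => ?_, fun w hw => ?_, fun w hw => hw.elim, List.Pairwise.nil⟩
      · rcases hw with h | h | h <;> simp_all <;> first | exact h1 | exact le_trans h1 h2
      · simp_all)

-- sorted of a triple is some ≤-ordered triple permuting it
lemma sort3ex (x y z : String) : ∃ a b c, PySem.List.sorted [x,y,z] (fun s => s) false = [a,b,c] ∧ List.Perm [a,b,c] [x,y,z] ∧ a ≤ b ∧ b ≤ c := by
  have hl := PySem.List.length_sorted [x,y,z] (fun s => s) false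
  have hp := PySem.List.sorted_perm [x,y,z] (fun s => s) false
  have hpw := PySem.List.sorted_pairwise [x,y,z] (fun s => s)
  match h : PySem.List.sorted [x,y,z] (fun s => s) false with
  | [a,b,c] =>
    refine ⟨a,b,c,rfl,?_,?_,?_⟩ <;> rw [h] at hp hpw <;> simp_all [List.pairwise_cons]
  | [] | [_] | [_,_] | _::_::_::_::_ => rw [h] at hl; simp at hl

-- ===== VERDICT (by name: the statement is the Claim_ definition above) =====
theorem get_consensus_spec : Claim_equal_get_consensus := by
  intro l1 l2 l3 _
  unfold Spec_get_consensus get_consensus get_consensus_alt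
  by_cases h12 : l1 = l2
  · subst h12
    by_cases h23 : l1 = l3
    · -- all equal
      subst h23
      rw [sort3 l1 l1 l1 l1 l1 l1 (List.Perm.refl _) le_rfl le_rfl]
      by_cases hn : l1 = "NONE" <;>
        simp_all [PySem.Dict.counter, PySem.Dict.modify, PySem.Dict.getD, PySem.Dict.get?,
          PySem.Dict.empty, PySem.Dict.insert, List.find?, List.take, List.foldl,
          PySem.List.sorted, PySem.List.insertBy,
          PySem.Set.ofList, PySem.Set.add, PySem.Set.contains, PySem.Set.len,
            beq_iff_eq] <;>
          simp_all [eq_comm] <;>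
          simp_all [show ∀ s t : String, (s == t) = decide (s = t) from fun s t => rfl]
    · -- l1 = l2 ≠ l3
      rcases lt_or_gt_of_ne h23 with ho | ho
      · rw [sort3 l1 l1 l3 l1 l1 l3 (List.Perm.refl _) le_rfl ho.le]
        by_cases hn1 : l1 = "NONE" <;> by_cases hn3 : l3 = "NONE" <;>
          simp_all [PySem.Dict.counter, PySem.Dict.modify, PySem.Dict.getD, PySem.Dict.get?,
            PySem.Dict.empty, PySem.Dict.insert, List.find?, List.take, List.foldl,
            PySem.List.sorted, PySem.List.insertBy,
            PySem.Set.ofList, PySem.Set.add, PySem.Set.contains, PySem.Set.len,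
            beq_iff_eq] <;>
          simp_all [eq_comm] <;>
          simp_all [show ∀ s t : String, (s == t) = decide (s = t) from fun s t => rfl]
      · rw [sort3 l1 l1 l3 l3 l1 l1 (List.Perm.swap l1 l3 [l1] |>.trans (List.Perm.cons l1 (List.Perm.swap l1 l3 []))) ho.le le_rfl]
        by_cases hn1 : l1 = "NONE" <;> by_cases hn3 : l3 = "NONE" <;>
          simp_all [PySem.Dict.counter, PySem.Dict.modify, PySem.Dict.getD, PySem.Dict.get?,
            PySem.Dict.empty, PySem.Dict.insert, List.find?, List.take, List.foldl,
            PySem.List.sorted, PySem.List.insertBy,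
            PySem.Set.ofList, PySem.Set.add, PySem.Set.contains, PySem.Set.len,
            beq_iff_eq] <;>
          simp_all [eq_comm] <;>
          simp_all [show ∀ s t : String, (s == t) = decide (s = t) from fun s t => rfl]
  · by_cases h13 : l1 = l3
    · -- l1 = l3 ≠ l2
      subst h13
      rcases lt_or_gt_of_ne h12 with ho | ho
      · rw [sort3 l1 l2 l1 l1 l1 l2 (List.Perm.cons l1 (List.Perm.swap l2 l1 [])) le_rfl ho.le]
        by_cases hn1 : l1 = "NONE" <;> by_cases hn2 : l2 = "NONE" <;>
          simp_all [PySem.Dict.counter, PySem.Dict.modify, PySem.Dict.getD, PySem.Dict.get?,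
            PySem.Dict.empty, PySem.Dict.insert, List.find?, List.take, List.foldl,
            PySem.List.sorted, PySem.List.insertBy,
            PySem.Set.ofList, PySem.Set.add, PySem.Set.contains, PySem.Set.len,
            beq_iff_eq] <;>
          simp_all [eq_comm] <;>
          simp_all [show ∀ s t : String, (s == t) = decide (s = t) from fun s t => rfl]
      · rw [sort3 l1 l2 l1 l2 l1 l1 (List.Perm.swap l1 l2 [l1]) ho.le le_rfl]
        by_cases hn1 : l1 = "NONE" <;> by_cases hn2 : l2 = "NONE" <;>
          simp_all [PySem.Dict.counter, PySem.Dict.modify, PySem.Dict.getD, PySem.Dict.get?,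
            PySem.Dict.empty, PySem.Dict.insert, List.find?, List.take, List.foldl,
            PySem.List.sorted, PySem.List.insertBy,
            PySem.Set.ofList, PySem.Set.add, PySem.Set.contains, PySem.Set.len,
            beq_iff_eq] <;>
          simp_all [eq_comm] <;>
          simp_all [show ∀ s t : String, (s == t) = decide (s = t) from fun s t => rfl]
    · by_cases h23 : l2 = l3
      · -- l2 = l3 ≠ l1
        subst h23
        rcases lt_or_gt_of_ne h12 with ho | ho
        · rw [sort3 l1 l2 l2 l1 l2 l2 (List.Perm.refl _) ho.le le_rfl]
          by_cases hn1 : l1 = "NONE" <;> by_cases hn2 : l2 = "NONE" <;>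
            simp_all [PySem.Dict.counter, PySem.Dict.modify, PySem.Dict.getD, PySem.Dict.get?,
              PySem.Dict.empty, PySem.Dict.insert, List.find?, List.take, List.foldl,
              PySem.List.sorted, PySem.List.insertBy,
              PySem.Set.ofList, PySem.Set.add, PySem.Set.contains, PySem.Set.len,
            beq_iff_eq] <;>
          simp_all [eq_comm] <;>
          simp_all [show ∀ s t : String, (s == t) = decide (s = t) from fun s t => rfl]
        · rw [sort3 l1 l2 l2 l2 l2 l1 ((List.Perm.cons l2 (List.Perm.swap l1 l2 [])).trans (List.Perm.swap l1 l2 [l2])) le_rfl ho.le]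
          by_cases hn1 : l1 = "NONE" <;> by_cases hn2 : l2 = "NONE" <;>
            simp_all [PySem.Dict.counter, PySem.Dict.modify, PySem.Dict.getD, PySem.Dict.get?,
              PySem.Dict.empty, PySem.Dict.insert, List.find?, List.take, List.foldl,
              PySem.List.sorted, PySem.List.insertBy,
              PySem.Set.ofList, PySem.Set.add, PySem.Set.contains, PySem.Set.len,
            beq_iff_eq] <;>
          simp_all [eq_comm] <;>
          simp_all [show ∀ s t : String, (s == t) = decide (s = t) from fun s t => rfl]
      · -- all three distinct: B does not depend on the order, only on distinctness
        obtain ⟨a, b, c, hs, hp, hab, hbc⟩ := sort3ex l1 l2 l3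
        rw [hs]
        have hnd : List.Nodup [a, b, c] := hp.nodup_iff.mpr (by simp [h12, h13, h23])
        have hab' : a ≠ b := by simp [List.nodup_cons] at hnd; exact hnd.1.1
        have hbc' : b ≠ c := by simp [List.nodup_cons] at hnd; exact hnd.2
        have hac' : a ≠ c := by simp [List.nodup_cons] at hnd; exact hnd.1.2
        have h21 : ¬ l2 = l1 := fun h => h12 h.symm
        have h31 : ¬ l3 = l1 := fun h => h13 h.symm
        have h32 : ¬ l3 = l2 := fun h => h23 h.symm
        have hlen : List.length (PySem.Set.ofList [l1, l2, l3]) = 3 := by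
          simp [PySem.Set.ofList, PySem.Set.add, PySem.Set.contains,
            List.foldl, beq_iff_eq, h12, h13, h23, h21, h31, h32]
        have hcnt : (PySem.Dict.counter [l1, l2, l3]).items = [(l1, 1), (l2, 1), (l3, 1)] := by
          simp [PySem.Dict.counter, PySem.Dict.modify, PySem.Dict.getD, PySem.Dict.get?,
            PySem.Dict.empty, PySem.Dict.insert, PySem.Dict.items, List.find?, List.foldl,
            beq_iff_eq, h12, h13, h23, h21, h31, h32] <;>
            simp_all [show ∀ s t : String, (s == t) = decide (s = t) from fun s t => rfl]
        have hsorted : PySem.List.sorted [(l1, (1:Int)), (l2, 1), (l3, 1)] (fun p => p.2) true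
            = [(l1, 1), (l2, 1), (l3, 1)] :=
          PySem.List.sorted_rev_eq_self_of_pairwise _ _ (by simp [List.pairwise_cons])
        have hsum : ¬ ((if a = "NONE" then (1:Int) else 0) + (if b = "NONE" then 1 else 0)
            + (if c = "NONE" then 1 else 0)) = 2 := by
          by_cases ha : a = "NONE" <;> by_cases hb : b = "NONE" <;> by_cases hc : c = "NONE" <;>
            simp_all
        simp [hcnt, hsorted, hlen, hsum, hab', hbc', hac', List.take, beq_iff_eq]
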